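-- pv_equiv track=rewrite | github.com/omer6nahum/Decongestion-by-Representation | real_data/utils.py | congestion
-- ===== SOURCE A (Python) =====
-- from collections import Counter
--
-- NO_ITEM = -1
--
-- def congestion(y):
--     # over all items, sum the total number of over-congested choices
--     total_sum = 0
--     choices_per_item = Counter(y)
--     for item, count in choices_per_item.items():
--         if item == NO_ITEM:
--             total_sum += count  # also penalize for no-choice
--             continue
--         total_sum += max((0, count - 1))
--
--     return total_sum
-- ===== SOURCE B (Python) =====
-- NO_ITEM = -1
--
-- def congestion(y):
--     # closed form: each distinct value other than NO_ITEM contributes count-1,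
--     # NO_ITEM contributes all its occurrences => total = len - #distinct non-NO_ITEM values
--     ys = list(y)
--     return len(ys) - len(set(ys) - {NO_ITEM})
-- ===== Notes on version B (the rewrite author's own statement) =====
-- stated objective: simpler
-- what changed: Replaces the Counter build and per-item max loop by the closed form len(y) - len(set(y) - {NO_ITEM}), since each distinct non-NO_ITEM value contributes count-1 and NO_ITEM contributes all its occurrences.
import Mathlib
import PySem

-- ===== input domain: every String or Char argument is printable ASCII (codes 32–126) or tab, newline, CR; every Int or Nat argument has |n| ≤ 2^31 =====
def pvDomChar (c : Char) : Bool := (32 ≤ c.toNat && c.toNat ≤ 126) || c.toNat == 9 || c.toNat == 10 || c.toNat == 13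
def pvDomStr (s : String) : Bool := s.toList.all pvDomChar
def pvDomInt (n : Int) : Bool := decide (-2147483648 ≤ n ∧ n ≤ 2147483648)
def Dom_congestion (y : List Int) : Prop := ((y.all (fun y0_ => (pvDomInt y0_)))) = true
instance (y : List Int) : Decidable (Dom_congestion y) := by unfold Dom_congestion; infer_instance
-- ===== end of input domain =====

-- B replaces A's Counter-and-loop by the closed form len(y) - len(set(y) - {NO_ITEM}) (simpler).

-- ===== PORT A =====
-- Counter(y) then sum over its items in insertion order
def congestion (y : List Int) : Int :=
  (PySem.Dict.counter y).items.foldl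
    (fun acc p => if p.1 == (-1 : Int) then acc + p.2 else acc + max 0 (p.2 - 1)) 0

-- ===== PORT B =====
-- len(ys) - len(set(ys) - {NO_ITEM})
def congestion_alt (y : List Int) : Int :=
  (y.length : Int) - (PySem.Set.len (PySem.Set.diff (PySem.Set.ofList y) [(-1 : Int)]) : Int)

-- ===== PRECONDITION & SPEC =====
def Spec_congestion (y : List Int) (out : Int) : Prop := out = congestion_alt y
instance (y : List Int) (out : Int) : Decidable (Spec_congestion y out) := by unfold Spec_congestion; infer_instance

-- ===== CLAIM (what is proved, stated in full; the proofs are below) =====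
def Claim_equal_congestion : Prop := ∀ (y : List Int), Dom_congestion y → Spec_congestion y (congestion y)

-- ===== LEMMAS AND PROOFS =====

-- A's fold over (k, count) pairs, counts positive: adds the counts and subtracts one per non-(-1) key
theorem congestion_foldA (y : List Int) : ∀ (s : List Int) (acc : Int),
    (∀ k ∈ s, 1 ≤ y.count k) →
    ((s.map (fun k => (k, (y.count k : Int)))).foldl
      (fun acc p => if p.1 == (-1 : Int) then acc + p.2 else acc + max 0 (p.2 - 1)) acc)
    = acc + ((s.map (fun k => (y.count k : Int))).sum) - (s.countP (fun k => !(k == (-1 : Int))) : Int) := by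
  intro s
  induction s with
  | nil => intro acc _; simp
  | cons a s ih =>
    intro acc h
    have ha : 1 ≤ y.count a := h a (by simp)
    have hs : ∀ k ∈ s, 1 ≤ y.count k := fun k hk => h k (by simp [hk])
    simp only [List.map_cons, List.foldl_cons]
    by_cases hae : a = (-1 : Int)
    · rw [if_pos (by simp [hae]), ih _ hs]
      simp [hae]
      ring
    · rw [if_neg (by simp [hae])]
      have hmax : max 0 ((y.count a : Int) - 1) = (y.count a : Int) - 1 := by
        have : (1 : Int) ≤ (y.count a : Int) := by exact_mod_cast ha
        omega
      rw [hmax, ih _ hs]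
      simp [hae]
      ring

-- sum of counts over a nodup list covering y's elements is y's length
theorem congestion_sum_counts {α : Type} [DecidableEq α] :
    ∀ (y s : List α), s.Nodup → (∀ x ∈ y, x ∈ s) →
    (s.map (fun k => y.count k)).sum = y.length := by
  intro y
  induction y with
  | nil => intro s _ _; simp
  | cons x y ih =>
    intro s hnd hmem
    have hx : x ∈ s := hmem x (by simp)
    have hy : ∀ z ∈ y, z ∈ s := fun z hz => hmem z (by simp [hz])
    have hsplit : (s.map (fun k => (x :: y).count k)).sum
        = (s.map (fun k => y.count k)).sum + (s.map (fun k => if x = k then 1 else 0)).sum := by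
      rw [← List.sum_map_add]
      apply congrArg
      apply List.map_congr_left
      intro k _
      simp [List.count_cons]
    have hind : ∀ t : List α, (t.map (fun k => if x = k then 1 else 0)).sum = t.count x := by
      intro t
      induction t with
      | nil => simp
      | cons b t iht =>
        simp [List.count_cons, iht]
        by_cases hxb : x = b <;> simp [hxb, eq_comm] <;> omega
    rw [hsplit, ih s hnd hy, hind, List.Nodup.count hnd, if_pos hx]
    simp

-- a list of Nats summed after casting to Int is the cast of its sum
theorem congestion_sum_intCast (L : List Nat) :
    (List.map (fun (n : Nat) => (n : Int)) L).sum = (L.sum : Int) := by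
  induction L with
  | nil => simp
  | cons a L ih =>
    rw [List.map_cons, List.sum_cons, ih, List.sum_cons]
    omega

-- set difference with the singleton {-1} is the filter away of -1
theorem congestion_diff_singleton (s : List Int) :
    PySem.Set.diff s [(-1 : Int)] = s.filter (fun k => !(k == (-1 : Int))) := by
  induction s with
  | nil => rfl
  | cons a s ih =>
    by_cases h : a = (-1 : Int) <;>
      simp_all [PySem.Set.diff, PySem.Set.contains]

-- ===== VERDICT (by name: the statement is the Claim_ definition above) =====
theorem congestion_spec : Claim_equal_congestion := by
  intro y _
  unfold Spec_congestion congestion congestion_alt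
  rw [PySem.Dict.items_counter, congestion_foldA y (PySem.Set.ofList y) 0
    (fun k hk => List.count_pos_iff.mpr ((PySem.Set.mem_ofList _ _).mp hk))]
  have h1 : ((PySem.Set.ofList y).map (fun k => ((y.count k : Int)))).sum = (y.length : Int) := by
    rw [show ((PySem.Set.ofList y).map (fun k => ((y.count k : Int)))) =
        ((PySem.Set.ofList y).map (fun k => (y.count k))).map (fun n => ((n : Nat) : Int)) by
      simp [List.map_map]]
    rw [congestion_sum_intCast, congestion_sum_counts y (PySem.Set.ofList y)
      (PySem.Set.nodup_ofList y) (fun x hx => (PySem.Set.mem_ofList _ _).mpr hx)]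
  rw [h1, congestion_diff_singleton]
  simp [PySem.Set.len, List.countP_eq_length_filter]
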